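-- pv_equiv track=rewrite | github.com/aaryan-athena/Speech | ai_app.py | _truncate_history
-- ===== SOURCE A (Python) =====
-- def _truncate_history(messages: list[dict]) -> list[dict]:
--     total_words = 0
--     trimmed: list[dict] = []
--     for entry in reversed(messages):
--         words = len((entry.get("text") or "").split())
--         if total_words + words > 3000 and trimmed:
--             break
--         trimmed.append(entry)
--         total_words += words
--     return list(reversed(trimmed))
-- ===== SOURCE B (Python) =====
-- def _truncate_history(messages: list[dict]) -> list[dict]:
--     counts = [len((e.get("text") or "").split()) for e in messages]
--     total = sum(counts)
--     i = 0
--     n = len(messages)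
--     while n - i > 1 and total > 3000:
--         total -= counts[i]
--         i += 1
--     return messages[i:]
-- ===== Notes on version B (the rewrite author's own statement) =====
-- stated objective: alternative
-- what changed: Replaces the reverse-accumulate-then-re-reverse loop with a forward subtractive pass: precompute each message's word count and the grand total, then drop oldest messages from the front while more than one remains and the total exceeds 3000, returning the surviving suffix.
import Mathlib
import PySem

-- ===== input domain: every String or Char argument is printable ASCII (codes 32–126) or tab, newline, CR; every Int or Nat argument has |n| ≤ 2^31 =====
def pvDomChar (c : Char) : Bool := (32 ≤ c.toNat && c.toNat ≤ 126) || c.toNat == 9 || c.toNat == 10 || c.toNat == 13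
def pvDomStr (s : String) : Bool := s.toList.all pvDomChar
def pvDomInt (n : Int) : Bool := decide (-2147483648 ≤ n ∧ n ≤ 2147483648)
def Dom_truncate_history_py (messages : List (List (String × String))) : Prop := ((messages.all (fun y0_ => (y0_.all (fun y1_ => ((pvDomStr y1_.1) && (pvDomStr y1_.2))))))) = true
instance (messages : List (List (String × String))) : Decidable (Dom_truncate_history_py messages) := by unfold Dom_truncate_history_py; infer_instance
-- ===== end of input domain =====

-- B replaces A's reverse-accumulate-then-re-reverse loop by a forward subtractive pass
-- over a precomputed total (alternative decomposition, same exact behaviour).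


-- ===== PORT A =====
-- len((entry.get("text") or "").split()):  `x or ""` maps None to "" (getD) and leaves
-- "" unchanged, so getD is exact; str.split() is PySem.Str.split₀.
def pvWords (entry : List (String × String)) : Int :=
  ((PySem.Str.split₀ ((PySem.Dict.mk entry).getD "text" "")).length : Int)

-- the for-loop over reversed(messages), with `break` as an early return of `trimmed`
def pvLoopA (l : List (List (String × String))) (total_words : Int)
    (trimmed : List (List (String × String))) : List (List (String × String)) :=
  match l with
  | [] => trimmed
  | entry :: rest =>
      let words := pvWords entry
      if total_words + words > 3000 ∧ trimmed ≠ [] then trimmed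
      else pvLoopA rest (total_words + words) (trimmed ++ [entry])

def truncate_history_py (messages : List (List (String × String))) : List (List (String × String)) :=
  (pvLoopA messages.reverse 0 []).reverse

-- ===== PORT B =====
-- the while-loop: `n - i > 1` is `msgs.length > 1` for the remaining suffix msgs;
-- recursion consumes counts[i] and drops messages[i] from the front.
def pvLoopB (counts : List Int) (msgs : List (List (String × String))) (total : Int) :
    List (List (String × String)) :=
  match counts with
  | [] => msgs
  | c :: cs =>
      if msgs.length > 1 ∧ total > 3000 then pvLoopB cs msgs.tail (total - c) else msgs

def truncate_history_py_alt (messages : List (List (String × String))) : List (List (String × String)) :=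
  let counts := messages.map pvWords
  pvLoopB counts messages counts.sum

-- ===== PRECONDITION & SPEC =====
def Spec_truncate_history_py (messages : List (List (String × String))) (out : List (List (String × String))) : Prop := out = truncate_history_py_alt messages
instance (messages : List (List (String × String))) (out : List (List (String × String))) : Decidable (Spec_truncate_history_py messages out) := by unfold Spec_truncate_history_py; infer_instance

-- ===== CLAIM (what is proved, stated in full; the proofs are below) =====
def Claim_equal_truncate_history_py : Prop := ∀ (messages : List (List (String × String))), Dom_truncate_history_py messages → Spec_truncate_history_py messages (truncate_history_py messages)

-- ===== LEMMAS AND PROOFS =====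

-- common reference function: drop oldest while total > 3000 and more than one remains
def pvKeep (msgs : List (List (String × String))) : List (List (String × String)) :=
  match msgs with
  | [] => []
  | x :: rest =>
      if ((x :: rest).map pvWords).sum > 3000 ∧ rest ≠ [] then pvKeep rest else x :: rest

lemma pvWords_nonneg (e : List (String × String)) : 0 ≤ pvWords e := by
  simp [pvWords]

lemma pvSum_nonneg (l : List (List (String × String))) : 0 ≤ (l.map pvWords).sum := by
  induction l with
  | nil => simp
  | cons x xs ih =>
      simp only [List.map_cons, List.sum_cons]
      have := pvWords_nonneg x
      omega

-- if the loop broke early, the running total already exceeded 3000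
lemma pvLoopA_break_sum (l : List (List (String × String))) (t : Int)
    (tr : List (List (String × String))) (h : pvLoopA l t tr ≠ tr ++ l) :
    t + (l.map pvWords).sum > 3000 := by
  induction l generalizing t tr with
  | nil => simp [pvLoopA] at h
  | cons e rest ih =>
      simp only [pvLoopA] at h
      by_cases hb : t + pvWords e > 3000 ∧ tr ≠ []
      · have := pvSum_nonneg rest
        simp only [List.map_cons, List.sum_cons]
        omega
      · rw [if_neg hb] at h
        have := ih (t + pvWords e) (tr ++ [e]) (by simpa using h)
        simp only [List.map_cons, List.sum_cons]
        omega

-- appending one (older) element to the processed list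
lemma pvLoopA_append (l : List (List (String × String))) (x : List (String × String))
    (t : Int) (tr : List (List (String × String))) :
    pvLoopA (l ++ [x]) t tr =
      if pvLoopA l t tr = tr ++ l then
        (if t + (l.map pvWords).sum + pvWords x > 3000 ∧ tr ++ l ≠ [] then tr ++ l
         else tr ++ l ++ [x])
      else pvLoopA l t tr := by
  induction l generalizing t tr with
  | nil => simp [pvLoopA]
  | cons e rest ih =>
      by_cases hb : t + pvWords e > 3000 ∧ tr ≠ []
      · have hlen : pvLoopA (e :: rest) t tr ≠ tr ++ e :: rest := by
          simp only [pvLoopA, if_pos hb]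
          intro hEq
          have := congrArg List.length hEq
          simp at this
        rw [if_neg hlen]
        simp only [pvLoopA, List.cons_append, if_pos hb]
      · simp only [pvLoopA, List.cons_append, if_neg hb]
        rw [ih (t + pvWords e) (tr ++ [e])]
        have hassoc : tr ++ [e] ++ rest = tr ++ e :: rest := by simp
        rw [hassoc]
        have hsum : t + pvWords e + (rest.map pvWords).sum =
            t + ((e :: rest).map pvWords).sum := by
          simp only [List.map_cons, List.sum_cons]; ring
        rw [hsum]

lemma pvA_eq_keep (msgs : List (List (String × String))) :
    truncate_history_py msgs = pvKeep msgs := by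
  induction msgs with
  | nil => rfl
  | cons x rest ih =>
      simp only [truncate_history_py, List.reverse_cons, pvKeep] at *
      rw [pvLoopA_append rest.reverse x 0 []]
      by_cases hfull : pvLoopA rest.reverse 0 [] = [] ++ rest.reverse
      · rw [if_pos hfull]
        have hsum : (0 : Int) + (rest.reverse.map pvWords).sum + pvWords x =
            ((x :: rest).map pvWords).sum := by
          simp only [List.map_cons, List.sum_cons]
          rw [List.map_reverse, List.sum_reverse]
          ring
        rw [hsum]
        by_cases hc : ((x :: rest).map pvWords).sum > 3000 ∧ rest ≠ []
        · have hc' : ((x :: rest).map pvWords).sum > 3000 ∧ ([] : List (List (String × String))) ++ rest.reverse ≠ [] := by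
            simpa using hc
          rw [if_pos hc', if_pos hc]
          rw [hfull] at ih
          simpa using ih
        · have hc' : ¬ (((x :: rest).map pvWords).sum > 3000 ∧ ([] : List (List (String × String))) ++ rest.reverse ≠ []) := by
            simpa using hc
          rw [if_neg hc', if_neg hc]
          simp
      · rw [if_neg hfull]
        have hrest_ne : rest ≠ [] := by
          intro h; subst h; simp [pvLoopA] at hfull
        have hbig : ((x :: rest).map pvWords).sum > 3000 := by
          have h1 := pvLoopA_break_sum rest.reverse 0 [] (by simpa using hfull)
          have := pvWords_nonneg x
          simp only [List.map_cons, List.sum_cons]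
          rw [List.map_reverse, List.sum_reverse] at h1
          omega
        rw [if_pos ⟨hbig, hrest_ne⟩]
        exact ih

lemma pvB_eq_keep (msgs : List (List (String × String))) :
    truncate_history_py_alt msgs = pvKeep msgs := by
  induction msgs with
  | nil => rfl
  | cons x rest ih =>
      simp only [truncate_history_py_alt, pvKeep, List.map_cons, List.sum_cons] at *
      simp only [pvLoopB]
      by_cases hr : rest = []
      · subst hr
        simp
      · have hlen : (x :: rest).length > 1 := by
          cases rest with
          | nil => exact absurd rfl hr
          | cons a b => simp
        by_cases ht : pvWords x + (rest.map pvWords).sum > 3000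
        · rw [if_pos ⟨hlen, ht⟩, if_pos ⟨by omega, hr⟩]
          have : pvWords x + (rest.map pvWords).sum - pvWords x = (rest.map pvWords).sum := by ring
          simpa [List.tail, this] using ih
        · rw [if_neg (fun h => ht h.2), if_neg (fun h => ht h.1)]

-- ===== VERDICT (by name: the statement is the Claim_ definition above) =====
theorem truncate_history_py_spec : Claim_equal_truncate_history_py := by
  intro messages _
  unfold Spec_truncate_history_py
  rw [pvA_eq_keep, pvB_eq_keep]
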